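-- pv_equiv track=rewrite | github.com/yetone/olo | olo/database/__init__.py | reduce_indexes
-- ===== SOURCE A (Python) =====
-- from typing import TYPE_CHECKING, Optional, Tuple, Set, List, Any, Callable
--
-- def reduce_indexes(indexes: Set[Tuple]) -> List[Tuple]:
--     indexes = sorted(indexes)
--     l = len(indexes)
--     res = []
--     for i in range(l):
--         cur = indexes[i]
--         if i == l - 1:
--             res.append(cur)
--             break
--         if tuple(indexes[i + 1][:len(cur)]) != tuple(cur):
--             res.append(cur)
--     return res
-- ===== SOURCE B (Python) =====
-- def reduce_indexes(indexes):
--     # dedupe the sorted sequence, then keep exactly the tuples that no other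
--     # tuple in the collection extends (the definition of "reduced"), instead
--     # of comparing each tuple with its immediate sorted successor.
--     vals = []
--     for t in sorted(indexes):
--         if not vals or vals[-1] != t:
--             vals.append(t)
--     return [t for t in vals if not any(o != t and o[:len(t)] == t for o in vals)]
-- ===== Notes on version B (the rewrite author's own statement) =====
-- stated objective: alternative
-- what changed: Instead of scanning the sorted list and dropping each tuple whose immediate successor extends it, B dedupes the sorted list and keeps exactly the tuples that no other tuple in the collection has as a prefix (an all-pairs filter straight from the definition, with no ordering-dependent adjacency state).
import Mathlib
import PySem

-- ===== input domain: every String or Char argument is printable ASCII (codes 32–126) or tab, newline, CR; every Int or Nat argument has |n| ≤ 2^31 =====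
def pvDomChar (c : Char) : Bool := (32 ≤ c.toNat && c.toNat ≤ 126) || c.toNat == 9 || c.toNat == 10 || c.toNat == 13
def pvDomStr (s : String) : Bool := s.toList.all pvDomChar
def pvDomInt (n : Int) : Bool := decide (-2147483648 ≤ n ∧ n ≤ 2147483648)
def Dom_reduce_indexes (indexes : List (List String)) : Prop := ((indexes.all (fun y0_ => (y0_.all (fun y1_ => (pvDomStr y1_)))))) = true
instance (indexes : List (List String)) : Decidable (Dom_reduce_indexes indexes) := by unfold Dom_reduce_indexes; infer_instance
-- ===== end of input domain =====

-- B replaces A's adjacent-successor scan over the sorted list by a definition-direct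
-- all-pairs prefix filter over the deduplicated sorted list (alternative algorithm, same results).


-- ===== PORT A =====
-- the 'for i in range(l)' loop with its break; i is always a valid nonnegative index
-- (0 ≤ i < l = idx.length), so plain Nat indexing with List.getD is exact here,
-- and tuple <-> list conversions are identities at this type.
def aLoop (idx : List (List String)) (l : Nat) (i : Nat) (res : List (List String)) :
    List (List String) :=
  if _h : i < l then
    let cur := idx.getD i []
    if i = l - 1 then res ++ [cur]           -- append, then break
    else if (idx.getD (i + 1) []).take cur.length ≠ cur then aLoop idx l (i + 1) (res ++ [cur])
    else aLoop idx l (i + 1) res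
  else res
  termination_by l - i

def reduce_indexes (indexes : List (List String)) : List (List String) :=
  let idx := PySem.List.sorted indexes (fun x => x) false
  let l := idx.length
  aLoop idx l 0 []

-- ===== PORT B =====
def reduce_indexes_alt (indexes : List (List String)) : List (List String) :=
  let vals := (PySem.List.sorted indexes (fun x => x) false).foldl
    (fun acc t => if acc = [] ∨ acc.getLast? ≠ some t then acc ++ [t] else acc) []
  vals.filter (fun t => ! vals.any (fun o => o != t && decide (o.take t.length = t)))

-- ===== PRECONDITION & SPEC =====
def Spec_reduce_indexes (indexes : List (List String)) (out : List (List String)) : Prop := out = reduce_indexes_alt indexes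
instance (indexes : List (List String)) (out : List (List String)) : Decidable (Spec_reduce_indexes indexes out) := by unfold Spec_reduce_indexes; infer_instance

-- ===== CLAIM (what is proved, stated in full; the proofs are below) =====
def Claim_equal_reduce_indexes : Prop := ∀ (indexes : List (List String)), Dom_reduce_indexes indexes → Spec_reduce_indexes indexes (reduce_indexes indexes)

-- ===== LEMMAS AND PROOFS =====

-- A's loop, expressed structurally on the suffix of the sorted list
def adjScan : List (List String) → List (List String)
  | [] => []
  | [x] => [x]
  | x :: y :: r => (if y.take x.length ≠ x then [x] else []) ++ adjScan (y :: r)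

-- B's adjacent dedupe, expressed structurally
def dgo (prev : List String) : List (List String) → List (List String)
  | [] => []
  | y :: ys => if y = prev then dgo prev ys else y :: dgo y ys

def dA : List (List String) → List (List String)
  | [] => []
  | x :: xs => x :: dgo x xs

theorem aLoop_eq_adjScan (idx : List (List String)) (i : Nat) (res : List (List String)) :
    aLoop idx idx.length i res = res ++ adjScan (idx.drop i) := by
  by_cases h : i < idx.length
  · rw [aLoop]
    have hdrop : idx.drop i = idx[i] :: idx.drop (i + 1) := List.drop_eq_getElem_cons h
    have hget : idx.getD i [] = idx[i] := List.getD_eq_getElem idx [] h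
    by_cases hlast : i = idx.length - 1
    · have h1 : idx.drop (i + 1) = [] := by
        apply List.drop_eq_nil_of_le; omega
      simp only [dif_pos h, if_pos hlast, hget, hdrop, h1, adjScan]
    · have h2 : i + 1 < idx.length := by omega
      have hdrop2 : idx.drop (i + 1) = idx[i + 1] :: idx.drop (i + 2) := List.drop_eq_getElem_cons h2
      have hget2 : idx.getD (i + 1) [] = idx[i + 1] := List.getD_eq_getElem idx [] h2
      have IH := aLoop_eq_adjScan idx (i + 1) 
      simp only [dif_pos h, if_neg hlast, hget, hget2]
      by_cases hc : idx[i + 1].take idx[i].length ≠ idx[i]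
      · rw [if_pos hc, IH (res ++ [idx[i]]), hdrop, hdrop2, adjScan, ← hdrop2, if_pos hc]
        simp
      · rw [if_neg hc, IH res, hdrop, hdrop2, adjScan, ← hdrop2, if_neg hc]
        simp
  · rw [aLoop]
    have : idx.drop i = [] := by apply List.drop_eq_nil_of_le; omega
    simp [dif_neg h, this, adjScan]
  termination_by idx.length - i

theorem foldl_dedup_go (xs res : List (List String)) (prev : List String)
    (h : res.getLast? = some prev) :
    xs.foldl (fun acc t => if acc = [] ∨ acc.getLast? ≠ some t then acc ++ [t] else acc) res
      = res ++ dgo prev xs := by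
  induction xs generalizing res prev with
  | nil => simp [dgo]
  | cons y ys ih =>
    have hne : res ≠ [] := by intro hr; rw [hr] at h; simp at h
    by_cases hy : y = prev
    · subst hy
      have : ¬ (res = [] ∨ res.getLast? ≠ some y) :=
        fun hor => hor.elim (fun h0 => hne h0) (fun hn => hn h)
      simp only [List.foldl_cons, if_neg this, dgo]
      exact ih res y h
    · have : (res = [] ∨ res.getLast? ≠ some y) := by
        right; rw [h]; simp; intro hc; exact hy hc.symm
      simp only [List.foldl_cons, if_pos this, dgo, if_neg hy]
      rw [ih (res ++ [y]) y (by simp)]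
      simp

theorem foldl_dedup (xs : List (List String)) :
    xs.foldl (fun acc t => if acc = [] ∨ acc.getLast? ≠ some t then acc ++ [t] else acc) []
      = dA xs := by
  cases xs with
  | nil => rfl
  | cons x xs =>
    simp only [List.foldl_cons]
    show List.foldl _ ([] ++ [x]) xs = dA (x :: xs)
    rw [List.nil_append, dA]
    exact foldl_dedup_go xs [x] x rfl

theorem adjScan_dA (x : List String) (xs : List (List String)) :
    adjScan (x :: xs) = adjScan (x :: dgo x xs) := by
  induction xs generalizing x with
  | nil => rfl
  | cons y ys ih =>
    by_cases hy : y = x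
    · subst hy
      have hx : ¬ (y.take y.length ≠ y) := by simp
      rw [adjScan, if_neg hx, dgo, if_pos rfl, List.nil_append]
      exact ih y
    · rw [adjScan, dgo, if_neg hy, adjScan, ih y]

theorem pairwise_dgo (xs : List (List String)) (prev : List String)
    (hp : xs.Pairwise (· ≤ ·)) (hall : ∀ a ∈ xs, prev ≤ a) :
    (prev :: dgo prev xs).Pairwise (· < ·) := by
  induction xs generalizing prev with
  | nil => simp [dgo]
  | cons y ys ih =>
    rw [List.pairwise_cons] at hp
    by_cases hy : y = prev
    · rw [dgo, if_pos hy]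
      exact ih prev hp.2 (fun a ha => le_trans hy.ge (hp.1 a ha))
    · have hlt : prev < y := lt_of_le_of_ne (hall y (by simp)) (fun h => hy h.symm)
      have hrec := ih y hp.2 hp.1
      rw [dgo, if_neg hy, List.pairwise_cons]
      refine ⟨?_, hrec⟩
      intro b hb
      rcases List.mem_cons.1 hb with h1 | h2
      · rw [h1]; exact hlt
      · exact lt_trans hlt ((List.pairwise_cons.1 hrec).1 b h2)

theorem pairwise_dA (xs : List (List String)) (hp : xs.Pairwise (· ≤ ·)) :
    (dA xs).Pairwise (· < ·) := by
  cases xs with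
  | nil => simp [dA]
  | cons x xs =>
    rw [List.pairwise_cons] at hp
    exact pairwise_dgo xs x hp.2 hp.1

-- the sort order produced by PySem.List.sorted elaborates with core's list LT but
-- LinearOrder's DecidableLT is propositionally the same, so the ORDER lemma transfers
theorem sorted_pw (xs : List (List String)) :
    (PySem.List.sorted xs (fun x => x)).Pairwise (· ≤ ·) := by
  rw [show (fun (a b : List String) => a.decidableLT b)
      = (LinearOrder.toDecidableLT : DecidableLT (List String)) from
    funext fun a => funext fun b => Subsingleton.elim _ _]
  exact PySem.List.sorted_pairwise xs (fun x => x)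

-- lex-order facts: a proper prefix is strictly smaller, and the tuples that a
-- given tuple is a prefix of form an interval in the sorted order
theorem prefix_not_lt {x o : List String} (h : x <+: o) : ¬ o < x := by
  induction x generalizing o with
  | nil => exact List.not_lt_nil o
  | cons a x' ih =>
    obtain ⟨b, o', rfl⟩ : ∃ b o', o = b :: o' := by
      cases o with
      | nil => simp at h
      | cons b o' => exact ⟨b, o', rfl⟩
    obtain ⟨hab, hxo⟩ := List.cons_prefix_cons.1 h
    subst hab
    intro hlt
    rcases List.cons_lt_cons_iff.1 hlt with h1 | ⟨_, h2⟩
    · exact lt_irrefl a h1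
    · exact ih hxo h2

theorem prefix_lt {x o : List String} (h : x <+: o) (hne : x ≠ o) : x < o :=
  lt_of_le_of_ne (not_lt.1 (prefix_not_lt h)) hne

theorem prefix_interval {x y z : List String} (h : x <+: z) (h1 : x ≤ y) (h2 : y ≤ z) :
    x <+: y := by
  induction x generalizing y z with
  | nil => exact List.nil_prefix
  | cons a x' ih =>
    obtain ⟨b, z', rfl⟩ : ∃ b z', z = b :: z' := by
      cases z with
      | nil => simp at h
      | cons b z' => exact ⟨b, z', rfl⟩
    obtain ⟨hab, hxz⟩ := List.cons_prefix_cons.1 h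
    subst hab
    have h1' : ¬ y < a :: x' := not_lt.2 h1
    have h2' : ¬ (a :: z') < y := not_lt.2 h2
    cases y with
    | nil => exact absurd (List.nil_lt_cons a x') h1'
    | cons c y' =>
      have hac : a = c := by
        rcases lt_trichotomy a c with hlt | heq | hgt
        · exact absurd (List.cons_lt_cons_iff.2 (Or.inl hlt)) h2'
        · exact heq
        · exact absurd (List.cons_lt_cons_iff.2 (Or.inl hgt)) h1'
      subst hac
      have hx'y' : x' ≤ y' :=
        not_lt.1 (fun hh => h1' (List.cons_lt_cons_iff.2 (Or.inr ⟨rfl, hh⟩)))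
      have hy'z' : y' ≤ z' :=
        not_lt.1 (fun hh => h2' (List.cons_lt_cons_iff.2 (Or.inr ⟨rfl, hh⟩)))
      exact List.cons_prefix_cons.2 ⟨rfl, ih hxz hx'y' hy'z'⟩

-- B's filter predicate, literally: dropping a non-extension head from the scanned list
theorem any_ext_cons (x t : List String) (rest : List (List String))
    (hx : (x != t && decide (x.take t.length = t)) = false) :
    (x :: rest).any (fun o => o != t && decide (o.take t.length = t))
      = rest.any (fun o => o != t && decide (o.take t.length = t)) := by
  simp only [List.any_cons, hx, Bool.false_or]

theorem adjScan_filter (v : List (List String)) (hp : v.Pairwise (· < ·)) :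
    adjScan v = v.filter (fun t => ! v.any (fun o => o != t && decide (o.take t.length = t))) := by
  induction v with
  | nil => rfl
  | cons x rest ih =>
    rw [List.pairwise_cons] at hp
    -- x itself never counts as an extension of x
    have head_eq : (x :: rest).any (fun o => o != x && decide (o.take x.length = x))
        = rest.any (fun o => o != x && decide (o.take x.length = x)) :=
      any_ext_cons x x rest (by simp)
    -- for t ∈ rest, x never extends t (x < t, but an extension of t is > t)
    have tail_filter :
        rest.filter (fun t => ! (x :: rest).any (fun o => o != t && decide (o.take t.length = t)))
          = adjScan rest := by
      refine (List.filter_congr ?_).trans (ih hp.2).symm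
      intro t ht
      have hx : (x != t && decide (x.take t.length = t)) = false := by
        simp only [Bool.and_eq_false_iff, bne_eq_false_iff_eq, decide_eq_false_iff_not]
        by_cases hne : x = t
        · left; simp [hne]
        · right
          intro htake
          have hpre : t <+: x := (List.prefix_iff_eq_take).2 htake.symm
          exact absurd (hp.1 t ht) (not_lt_of_gt (prefix_lt hpre (fun h => hne h.symm)))
      rw [any_ext_cons x t rest hx]
    cases rest with
    | nil => simp [adjScan, List.filter]
    | cons y r =>
      have hxy : x < y := hp.1 y (by simp)
      -- head decision: the sorted successor extends x iff some member extends x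
      have key : (y :: r).any (fun o => o != x && decide (o.take x.length = x))
          = decide (y.take x.length = x) := by
        by_cases hyx : y.take x.length = x
        · rw [decide_eq_true hyx, List.any_eq_true]
          refine ⟨y, by simp, ?_⟩
          simp only [Bool.and_eq_true, bne_iff_ne, decide_eq_true_eq]
          exact ⟨fun h => absurd h.symm (ne_of_lt hxy), hyx⟩
        · rw [decide_eq_false hyx, List.any_eq_false]
          intro o ho
          simp only [Bool.and_eq_true, bne_iff_ne, decide_eq_true_eq, not_and]
          intro _ htake
          have hyo : y ≤ o := by
            rcases List.mem_cons.1 ho with h1 | h2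
            · rw [h1]
            · exact le_of_lt ((List.pairwise_cons.1 hp.2).1 o h2)
          have hpre : x <+: o := (List.prefix_iff_eq_take).2 htake.symm
          have : x <+: y := prefix_interval hpre (le_of_lt hxy) hyo
          exact hyx ((List.prefix_iff_eq_take).1 this).symm
      rw [adjScan, List.filter_cons]
      by_cases hc : y.take x.length = x
      · have hpx : (! (x :: y :: r).any (fun o => o != x && decide (o.take x.length = x))) = false := by
          rw [head_eq, key, decide_eq_true hc]; rfl
        rw [if_neg (by simp [hc]), List.nil_append]
        simp only [hpx, Bool.false_eq_true, if_false]
        exact tail_filter.symm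
      · have hpx : (! (x :: y :: r).any (fun o => o != x && decide (o.take x.length = x))) = true := by
          rw [head_eq, key, decide_eq_false hc]; rfl
        rw [if_pos (by simp [hc])]
        simp only [hpx, if_true]
        rw [tail_filter, List.singleton_append]

-- ===== VERDICT (by name: the statement is the Claim_ definition above) =====
theorem reduce_indexes_spec : Claim_equal_reduce_indexes := by
  unfold Claim_equal_reduce_indexes
  intro indexes _
  unfold Spec_reduce_indexes
  simp only [reduce_indexes, reduce_indexes_alt]
  have hp : (PySem.List.sorted indexes (fun x => x) false).Pairwise (· ≤ ·) :=
    sorted_pw indexes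
  rw [aLoop_eq_adjScan _ 0 [], List.drop_zero, List.nil_append, foldl_dedup]
  have h1 : adjScan (PySem.List.sorted indexes (fun x => x) false)
      = adjScan (dA (PySem.List.sorted indexes (fun x => x) false)) := by
    cases h : PySem.List.sorted indexes (fun x => x) false with
    | nil => rfl
    | cons x xs => exact adjScan_dA x xs
  rw [h1, adjScan_filter _ (pairwise_dA _ hp)]
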